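-- pv_equiv track=rewrite | github.com/Robert-Davie/advent-of-code-2024 | solutions/day7.py | solve
-- ===== SOURCE A (Python) =====
-- def solve(this_target, options, running_total):
--     if not options:
--         return running_total == this_target
--     removed = options[0]
--     remainder = options[1:]
--     return any([
--         solve(this_target, remainder, running_total + removed),
--         solve(this_target, remainder, running_total * removed),
--     ])
-- ===== SOURCE B (Python) =====
-- def solve(this_target, options, running_total):
--     totals = {running_total}
--     for v in options:
--         totals = {t + v for t in totals} | {t * v for t in totals}
--     return this_target in totals
-- ===== Notes on version B (the rewrite author's own statement) =====
-- stated objective: alternative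
-- what changed: Replaced the depth-first 2^n recursion over operator choices with an iterative forward pass maintaining a deduplicated set of all reachable running totals, then a single membership test.
import Mathlib
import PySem

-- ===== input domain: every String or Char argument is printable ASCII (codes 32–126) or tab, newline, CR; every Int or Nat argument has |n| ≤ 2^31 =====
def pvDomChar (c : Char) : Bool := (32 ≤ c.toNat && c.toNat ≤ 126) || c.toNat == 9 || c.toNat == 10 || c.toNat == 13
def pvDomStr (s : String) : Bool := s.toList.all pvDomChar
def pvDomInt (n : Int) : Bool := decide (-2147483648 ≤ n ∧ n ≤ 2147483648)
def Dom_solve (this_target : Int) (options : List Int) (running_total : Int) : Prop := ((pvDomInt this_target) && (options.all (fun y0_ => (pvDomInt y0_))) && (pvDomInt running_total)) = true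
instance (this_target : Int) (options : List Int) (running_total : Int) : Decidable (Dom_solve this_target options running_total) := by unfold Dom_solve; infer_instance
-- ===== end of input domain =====

-- B replaces A's depth-first recursion by an iterative forward pass over a deduplicated set of reachable running totals (objective: alternative algorithm).

-- ===== PORT A =====
def solve (this_target : Int) (options : List Int) (running_total : Int) : Bool :=
  match options with
  | [] => running_total == this_target
  | removed :: remainder =>
      [solve this_target remainder (running_total + removed),
       solve this_target remainder (running_total * removed)].any id

-- ===== PORT B =====
-- one loop step: totals = {t + v for t in totals} | {t * v for t in totals}
def solveAltStep (totals : PySem.Set Int) (v : Int) : PySem.Set Int :=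
  PySem.Set.union (PySem.Set.ofList (totals.map (fun t => t + v))) (totals.map (fun t => t * v))

def solve_alt (this_target : Int) (options : List Int) (running_total : Int) : Bool :=
  let totals := options.foldl solveAltStep (PySem.Set.ofList [running_total])
  PySem.Set.contains totals this_target

-- ===== PRECONDITION & SPEC =====
def Spec_solve (this_target : Int) (options : List Int) (running_total : Int) (out : Bool) : Prop := out = solve_alt this_target options running_total
instance (this_target : Int) (options : List Int) (running_total : Int) (out : Bool) : Decidable (Spec_solve this_target options running_total out) := by unfold Spec_solve; infer_instance

-- ===== CLAIM (what is proved, stated in full; the proofs are below) =====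
def Claim_equal_solve : Prop := ∀ (this_target : Int) (options : List Int) (running_total : Int), Dom_solve this_target options running_total → Spec_solve this_target options running_total (solve this_target options running_total)

-- ===== LEMMAS AND PROOFS =====

-- the frontier set contains the target iff some seed total solves the remaining options
theorem mem_foldl_solveAltStep (t : Int) :
    ∀ (opts : List Int) (s : List Int),
      t ∈ opts.foldl solveAltStep s ↔ ∃ r ∈ s, solve t opts r = true := by
  intro opts
  induction opts with
  | nil =>
      intro s
      simp only [List.foldl_nil, solve, beq_iff_eq]
      exact ⟨fun h => ⟨t, h, rfl⟩, fun ⟨r, hr, h⟩ => h ▸ hr⟩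
  | cons v vs ih =>
      intro s
      rw [List.foldl_cons, ih]
      constructor
      · rintro ⟨x, hx, hsol⟩
        simp only [solveAltStep, PySem.Set.mem_union, PySem.Set.mem_ofList, List.mem_map] at hx
        rcases hx with ⟨r, hr, rfl⟩ | ⟨r, hr, rfl⟩
        · exact ⟨r, hr, by simp [solve, hsol]⟩
        · exact ⟨r, hr, by simp [solve, hsol]⟩
      · rintro ⟨r, hr, hsol⟩
        simp only [solve, List.any_cons, List.any_nil, id, Bool.or_false, Bool.or_eq_true] at hsol
        rcases hsol with h | h
        · refine ⟨r + v, ?_, h⟩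
          simp only [solveAltStep, PySem.Set.mem_union, PySem.Set.mem_ofList, List.mem_map]
          exact Or.inl ⟨r, hr, rfl⟩
        · refine ⟨r * v, ?_, h⟩
          simp only [solveAltStep, PySem.Set.mem_union, PySem.Set.mem_ofList, List.mem_map]
          exact Or.inr ⟨r, hr, rfl⟩

-- ===== VERDICT (by name: the statement is the Claim_ definition above) =====
theorem solve_spec : Claim_equal_solve := by
  intro t opts r _
  unfold Spec_solve solve_alt
  rw [Bool.eq_iff_iff, PySem.Set.contains_iff, mem_foldl_solveAltStep]
  simp [PySem.Set.mem_ofList]
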